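-- pv_equiv track=rewrite | github.com/glebreutov/coding_challenges | snakes_and_ladders.py | num_board
-- ===== SOURCE A (Python) =====
-- def num_board(n):
--     res = []
--     for i in range(n * n, 0, -1):
--
--         reminder = i % n
--
--         if reminder == 0:
--             if len(res) % 2 == 0 and len(res) > 0:
--                 res[-1].reverse()
--             row = []
--             res.append(row)
--
--         row.append(i)
--
--     if len(res) % 2 == 0 and len(res) > 0:
--         res[-1].reverse()
--
--     return res
-- ===== SOURCE B (Python) =====
-- def num_board(n):
--     m = abs(n)
--     res = []
--     for r in range(m):
--         start = m * m - r * m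
--         row = list(range(start, start - m, -1))
--         if r % 2 == 1:
--             row.reverse()
--         res.append(row)
--     return res
-- ===== Notes on version B (the rewrite author's own statement) =====
-- stated objective: simpler
-- what changed: Replaces A's flat countdown over all n*n cells with modulo-detected row boundaries and in-place reversals of the previous row by a direct per-row construction: row r is range(m*m-r*m, m*m-(r+1)*m, -1), reversed when r is odd.
import Mathlib
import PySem

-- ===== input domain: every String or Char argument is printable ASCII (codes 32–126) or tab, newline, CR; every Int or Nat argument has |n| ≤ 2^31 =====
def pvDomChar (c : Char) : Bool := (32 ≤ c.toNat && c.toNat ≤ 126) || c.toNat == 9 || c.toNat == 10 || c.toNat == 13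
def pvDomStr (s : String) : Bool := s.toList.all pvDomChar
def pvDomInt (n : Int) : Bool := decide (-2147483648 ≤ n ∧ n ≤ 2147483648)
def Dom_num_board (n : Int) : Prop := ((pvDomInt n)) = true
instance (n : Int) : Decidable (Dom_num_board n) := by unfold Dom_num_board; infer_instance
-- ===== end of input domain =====

-- B builds the board row by row (row r = range(m*m-r*m, …, -1), reversed when r is odd) instead of
-- A's flat countdown over all n*n cells with modulo-detected boundaries and in-place reversals.

-- ===== PORT A =====
-- the state `res` is kept in reverse (head = current/last row); rows themselves in Python order.
-- `if len(res) % 2 == 0 and len(res) > 0: res[-1].reverse()` on that state: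
def pvRevHead (res : List (List Int)) : List (List Int) :=
  if res.length % 2 = 0 ∧ 0 < res.length then
    match res with
    | r :: rest => r.reverse :: rest
    | [] => []
  else res

-- one iteration of A's `for i in range(n*n, 0, -1)` body
def pvStepA (n : Int) (res : List (List Int)) (i : Int) : List (List Int) :=
  let res := if PySem.Int.mod i n = 0 then [] :: pvRevHead res else res
  match res with
  | r :: rest => (r ++ [i]) :: rest
  | [] => []

def num_board (n : Int) : List (List Int) :=
  (pvRevHead ((PySem.List.pyRange (n * n) 0 (-1)).foldl (pvStepA n) [])).reverse

-- ===== PORT B =====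
-- row r of B: start = m*m - r*m; list(range(start, start-m, -1)); reversed when r is odd
def pvRow (m r : Int) : List Int :=
  let start := m * m - r * m
  let row := PySem.List.pyRange start (start - m) (-1)
  if PySem.Int.mod r 2 = 1 then row.reverse else row

def num_board_alt (n : Int) : List (List Int) :=
  let m : Int := |n|
  (PySem.List.pyRange 0 m 1).foldl (fun res r => res ++ [pvRow m r]) []

-- ===== PRECONDITION & SPEC =====
def Spec_num_board (n : Int) (out : List (List Int)) : Prop := out = num_board_alt n
instance (n : Int) (out : List (List Int)) : Decidable (Spec_num_board n out) := by unfold Spec_num_board; infer_instance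

-- ===== CLAIM (what is proved, stated in full; the proofs are below) =====
def Claim_equal_num_board : Prop := ∀ (n : Int), Dom_num_board n → Spec_num_board n (num_board n)

-- ===== LEMMAS AND PROOFS =====

-- the descending row whose first entry is j*m (Python: the cells j*m, j*m-1, …, (j-1)*m+1)
def pvDesc (m j : Int) : List Int := PySem.List.pyRange (j * m) ((j - 1) * m) (-1)

-- A's state after processing k complete rows
def pvT (m : Int) : Nat → List (List Int)
  | 0 => []
  | k + 1 => pvDesc m (m - k) :: pvRevHead (pvT m k)

theorem pv_foldl_append_map (f : Int → List Int) (l : List Int) (init : List (List Int)) :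
    l.foldl (fun res r => res ++ [f r]) init = init ++ l.map f := by
  induction l generalizing init with
  | nil => simp
  | cons a l ih => simp [List.foldl_cons, ih]

theorem pv_stepA_abs (n : Int) : pvStepA n = pvStepA |n| := by
  funext res i
  unfold pvStepA
  have h : PySem.Int.mod i n = 0 ↔ PySem.Int.mod i |n| = 0 := by
    rw [PySem.Int.mod_eq_zero_iff_dvd, PySem.Int.mod_eq_zero_iff_dvd, abs_dvd]
  rw [if_congr h rfl rfl]

theorem pv_range_neg_append (a b c : Int) (h1 : c ≤ b) (h2 : b ≤ a) :
    PySem.List.pyRange a c (-1) = PySem.List.pyRange a b (-1) ++ PySem.List.pyRange b c (-1) := by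
  rw [PySem.List.pyRange_neg_one_eq_reverse, PySem.List.pyRange_neg_one_eq_reverse,
    PySem.List.pyRange_neg_one_eq_reverse, ← List.reverse_append,
    ← PySem.List.pyRange_one_append (c + 1) (b + 1) (a + 1) (by omega) (by omega)]

theorem pv_not_dvd_between (m j i : Int) (hm : 0 < m) (h1 : (j - 1) * m < i) (h2 : i < j * m) :
    ¬ PySem.Int.mod i m = 0 := by
  rw [PySem.Int.mod_eq_zero_iff_dvd]
  rintro ⟨q, rfl⟩
  have hq1 : j - 1 < q := by nlinarith
  have hq2 : q < j := by nlinarith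
  omega

theorem pv_steps_no_boundary (m : Int) (l : List Int) (row : List Int) (rest : List (List Int))
    (h : ∀ i ∈ l, ¬ PySem.Int.mod i m = 0) :
    l.foldl (pvStepA m) (row :: rest) = (row ++ l) :: rest := by
  induction l generalizing row with
  | nil => simp
  | cons a l ih =>
    have ha : ¬ PySem.Int.mod a m = 0 := h a (by simp)
    rw [List.foldl_cons]
    show l.foldl (pvStepA m) (pvStepA m (row :: rest) a) = _
    rw [show pvStepA m (row :: rest) a = (row ++ [a]) :: rest by simp [pvStepA, ha]]
    rw [ih (row ++ [a]) (fun i hi => h i (by simp [hi]))]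
    simp

theorem pv_rowfold (m j : Int) (hm : 0 < m) (_hj : 1 ≤ j) (res : List (List Int)) :
    (PySem.List.pyRange (j * m) ((j - 1) * m) (-1)).foldl (pvStepA m) res
      = pvDesc m j :: pvRevHead res := by
  have hlt : (j - 1) * m < j * m := by nlinarith
  rw [PySem.List.pyRange_neg_one_cons hlt, List.foldl_cons]
  have hdvd : PySem.Int.mod (j * m) m = 0 := by
    rw [PySem.Int.mod_eq_zero_iff_dvd]; exact ⟨j, mul_comm j m⟩
  rw [show pvStepA m res (j * m) = [j * m] :: pvRevHead res by simp [pvStepA, hdvd]]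
  rw [pv_steps_no_boundary m _ _ _ (by
    intro i hi
    rw [PySem.List.mem_pyRange_neg_one] at hi
    exact pv_not_dvd_between m j i hm hi.1 (by omega))]
  rw [pvDesc, PySem.List.pyRange_neg_one_cons hlt]
  simp

theorem pv_fold_k (m : Int) (hm : 0 < m) (k : Nat) (hk : (k : Int) ≤ m) :
    (PySem.List.pyRange (m * m) ((m - k) * m) (-1)).foldl (pvStepA m) [] = pvT m k := by
  induction k with
  | zero =>
    rw [show ((m - (0:Nat)) * m : Int) = m * m by push_cast; ring]
    rw [PySem.List.pyRange_neg_one_eq_nil le_rfl]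
    rfl
  | succ k ih =>
    have hk' : (k : Int) ≤ m := by push_cast at hk ⊢; omega
    have h1 : ((m - ((k:Nat)+1:Nat)) * m : Int) ≤ (m - k) * m := by
      push_cast
      have : (0:Int) ≤ m - ((k:Int)+1) := by push_cast at hk; omega
      nlinarith
    have h2 : ((m - (k:Int)) * m : Int) ≤ m * m := by nlinarith [hk']
    rw [pv_range_neg_append (m * m) ((m - (k:Int)) * m) ((m - ((k:Nat)+1:Nat)) * m) (by push_cast at h1 ⊢; omega) h2]
    rw [List.foldl_append, ih hk']
    rw [show ((m - ((k:Nat)+1:Nat)) * m : Int) = (m - (k:Int) - 1) * m by push_cast; ring]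
    rw [pv_rowfold m (m - (k:Int)) hm (by push_cast at hk; omega)]
    rfl

theorem pv_desc_row (m : Int) (k : Nat) :
    pvDesc m (m - k) = PySem.List.pyRange (m * m - k * m) (m * m - k * m - m) (-1) := by
  unfold pvDesc; congr 1 <;> ring

theorem pv_revHead_cons (m : Int) (k : Nat) :
    pvRevHead (pvDesc m (m - k) :: ((List.range k).map (fun r : Nat => pvRow m (r : Int))).reverse)
      = ((List.range (k + 1)).map (fun r : Nat => pvRow m (r : Int))).reverse := by
  have hmod : PySem.Int.mod (k : Int) 2 = 1 ↔ k % 2 = 1 := by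
    rw [show ((2:Int)) = ((2:Nat):Int) by norm_num, PySem.Int.mod_natCast]
    omega
  have hrow : pvRow m (k : Int) = if k % 2 = 1 then (pvDesc m (m - k)).reverse else pvDesc m (m - k) := by
    simp only [pvRow, pv_desc_row]
    exact if_congr hmod rfl rfl
  rw [List.range_succ, List.map_append, List.reverse_append]
  simp only [List.map_cons, List.map_nil, List.reverse_cons, List.reverse_nil, List.nil_append,
    List.singleton_append]
  unfold pvRevHead
  by_cases hk : k % 2 = 1
  · rw [if_pos (by simp; omega)]
    simp [hrow, hk]
  · rw [if_neg (by simp; omega)]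
    simp [hrow, hk]

theorem pv_T_char (m : Int) (k : Nat) :
    pvT m (k + 1) = pvDesc m (m - k) :: ((List.range k).map (fun r : Nat => pvRow m (r : Int))).reverse := by
  induction k with
  | zero => simp [pvT, pvRevHead]
  | succ k ih =>
    show pvDesc m (m - ((k:Nat)+1:Nat)) :: pvRevHead (pvT m (k + 1)) = _
    rw [ih, pv_revHead_cons]

-- ===== VERDICT (by name: the statement is the Claim_ definition above) =====
theorem num_board_spec : Claim_equal_num_board := by
  unfold Claim_equal_num_board Spec_num_board
  intro n _
  have habs : |n| = ((n.natAbs : Nat) : Int) := (Int.abs_eq_natAbs n)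
  have hB : num_board_alt n = (List.range n.natAbs).map (fun r : Nat => pvRow ((n.natAbs : Nat) : Int) (r : Int)) := by
    simp only [num_board_alt, habs]
    rw [pv_foldl_append_map, List.nil_append, PySem.List.pyRange_one]
    have h1 : (((n.natAbs : Int) - 0)).toNat = n.natAbs := by omega
    rw [h1, List.map_map]
    simp [Function.comp]
  rcases Nat.eq_zero_or_pos n.natAbs with h0 | hpos
  · have hn : n = 0 := by omega
    subst hn
    decide
  · have hm : (0:Int) < (n.natAbs : Int) := by exact_mod_cast hpos
    have hA : num_board n = (pvRevHead (pvT (n.natAbs : Int) n.natAbs)).reverse := by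
      unfold num_board
      rw [pv_stepA_abs, Int.abs_eq_natAbs]
      rw [show n * n = ((n.natAbs : Int)) * (n.natAbs : Int) by
        rw [show ((n.natAbs : Int)) * (n.natAbs : Int) = ((n.natAbs * n.natAbs : Nat) : Int) by push_cast; ring,
          Int.natAbs_mul_self]]
      rw [show (0:Int) = (((n.natAbs : Int) - (n.natAbs : Nat)) * (n.natAbs : Int)) by ring]
      rw [pv_fold_k (n.natAbs : Int) hm n.natAbs le_rfl]
    rw [hA, hB]
    obtain ⟨k, hk⟩ : ∃ k, n.natAbs = k + 1 := ⟨n.natAbs - 1, by omega⟩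
    rw [hk, pv_T_char, pv_revHead_cons, List.reverse_reverse]
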